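-- pv_equiv track=rewrite | github.com/Tosaaaki/QuantRabbit | analysis/strategy_feedback.py | _base_strategy_tag
-- ===== SOURCE A (Python) =====
-- from typing import Any, Optional
--
-- def _base_strategy_tag(value: Optional[str]) -> str:
--     text = str(value or "").strip()
--     if not text:
--         return ""
--     lowered = text.lower()
--     for suffix in ("-long", "-short", "_long", "_short", "/long", "/short"):
--         if not lowered.endswith(suffix):
--             continue
--         base = text[: -len(suffix)].rstrip("-_/ ")
--         if base:
--             return base
--     return ""
-- ===== SOURCE B (Python) =====
-- from typing import Any, Optional
--
--
-- def _base_strategy_tag(value: Optional[str]) -> str: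
--     text = str(value or "").strip()
--     if not text:
--         return ""
--     lowered = text.lower()
--     if lowered.endswith("long"):
--         word_len = 4
--     elif lowered.endswith("short"):
--         word_len = 5
--     else:
--         return ""
--     if len(text) <= word_len or text[-word_len - 1] not in "-_/":
--         return ""
--     base = text[: -word_len - 1].rstrip("-_/ ")
--     return base if base else ""
-- ===== Notes on version B (the rewrite author's own statement) =====
-- stated objective: alternative
-- what changed: Replaces A's scan over the six enumerated separator+word suffixes by two endswith tests for the bare words 'long'/'short' plus a check that the character before the word is one of '-', '_', '/'.
import Mathlib
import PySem

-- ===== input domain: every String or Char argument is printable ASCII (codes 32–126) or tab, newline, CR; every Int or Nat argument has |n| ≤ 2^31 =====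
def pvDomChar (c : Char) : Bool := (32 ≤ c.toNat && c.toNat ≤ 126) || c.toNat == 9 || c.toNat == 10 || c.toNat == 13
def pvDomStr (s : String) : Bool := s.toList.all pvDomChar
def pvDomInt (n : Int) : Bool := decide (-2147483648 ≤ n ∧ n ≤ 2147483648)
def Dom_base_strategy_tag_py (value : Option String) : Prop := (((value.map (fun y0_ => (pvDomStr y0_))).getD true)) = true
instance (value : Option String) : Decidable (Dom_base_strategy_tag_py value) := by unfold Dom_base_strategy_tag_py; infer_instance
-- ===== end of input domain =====

-- B replaces A's scan over six separator+word suffixes by two endswith word tests plus a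
-- check that a separator character precedes the word (alternative decomposition, same cost).

-- ===== PORT A =====
-- rstrip("-_/ ") — hand port (PySem has no right-only strip with a char set); exact:
-- drop the trailing run of '-', '_', '/', ' ' from the right.
def pvSepRstrip (s : String) : String :=
  String.ofList ((s.toList.reverse.dropWhile
    (fun c => c == '-' || c == '_' || c == '/' || c == ' ')).reverse)

def pvLoopA (text lowered : String) : List String → String
  | [] => ""
  | suf :: rest =>
    if PySem.Str.endswith lowered suf = true then
      let base := pvSepRstrip (PySem.Str.slice text none (some (-(PySem.Str.len suf))))
      if base ≠ "" then base else pvLoopA text lowered rest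
    else pvLoopA text lowered rest

def base_strategy_tag_py (value : Option String) : String :=
  let text := PySem.Str.strip (value.getD "")
  if text = "" then ""
  else pvLoopA text (PySem.Str.lower text)
    ["-long", "-short", "_long", "_short", "/long", "/short"]

-- ===== PORT B =====
-- after the word ("long"/"short", wl chars) matched at the end: boundary + base extraction
def pvBoundary (text : String) (wl : Nat) : String :=
  if PySem.Str.len text ≤ (wl : Int) then ""
  else
    match PySem.Str.pyGet? text (-(wl : Int) - 1) with
    | some c =>
      if c == '-' || c == '_' || c == '/' then
        let base := pvSepRstrip (PySem.Str.slice text none (some (-(wl : Int) - 1)))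
        if base ≠ "" then base else ""
      else ""
    | none => ""

def base_strategy_tag_py_alt (value : Option String) : String :=
  let text := PySem.Str.strip (value.getD "")
  if text = "" then ""
  else
    let lowered := PySem.Str.lower text
    if PySem.Str.endswith lowered "long" = true then pvBoundary text 4
    else if PySem.Str.endswith lowered "short" = true then pvBoundary text 5
    else ""

-- ===== PRECONDITION & SPEC =====
def Spec_base_strategy_tag_py (value : Option String) (out : String) : Prop := out = base_strategy_tag_py_alt value
instance (value : Option String) (out : String) : Decidable (Spec_base_strategy_tag_py value out) := by unfold Spec_base_strategy_tag_py; infer_instance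

-- ===== CLAIM (what is proved, stated in full; the proofs are below) =====
def Claim_equal_base_strategy_tag_py : Prop := ∀ (value : Option String), Dom_base_strategy_tag_py value → Spec_base_strategy_tag_py value (base_strategy_tag_py value)

-- ===== LEMMAS AND PROOFS =====

-- separators '-', '_', '/' are neither upper- nor lower-case letters
theorem pv_lowerChar_eq_iff (c sep : Char)
    (hs : sep.toNat < 65 ∨ (90 < sep.toNat ∧ sep.toNat < 97)) :
    PySem.Chars.lowerChar c = sep ↔ c = sep := by
  unfold PySem.Chars.lowerChar PySem.Chars.isupper
  split_ifs with h
  · simp only [Bool.and_eq_true, decide_eq_true_eq] at h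
    have h1n : (65:Nat) ≤ c.toNat := h.1
    have h2n : c.toNat ≤ 90 := h.2
    have hv : (c.toNat + 32).isValidChar := Or.inl (by omega)
    have hto : (Char.ofNat (c.toNat + 32)).toNat = c.toNat + 32 := by
      rw [Char.toNat_ofNat, if_pos hv]
    constructor
    · intro he; exfalso; rw [he] at hto; rcases hs with hs | hs <;> omega
    · intro he; exfalso; subst he; rcases hs with hs | hs <;> omega
  · exact Iff.rfl

theorem pv_endswith_cons_iff (l : List Char) (c : Char) (w : List Char) :
    PySem.Chars.endswith l (c :: w) = true ↔
      (PySem.Chars.endswith l w = true ∧ w.length < l.length ∧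
        l[l.length - w.length - 1]? = some c) := by
  simp only [PySem.Chars.endswith_iff]
  constructor
  · rintro ⟨p, rfl⟩
    refine ⟨⟨p ++ [c], by simp⟩, by simp; omega, ?_⟩
    have hidx : (p ++ c :: w).length - w.length - 1 = p.length := by simp; omega
    rw [hidx, List.getElem?_append_right (by omega)]
    simp
  · rintro ⟨⟨p, rfl⟩, hlen, hget⟩
    have hp : p ≠ [] := by
      intro h; subst h; simp at hlen
    have hidx : (p ++ w).length - w.length - 1 = p.length - 1 := by simp
    rw [hidx, List.getElem?_append_left (by have := List.length_pos_of_ne_nil hp; omega)] at hget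
    have hg : p.getLast? = some c := by
      rw [List.getLast?_eq_getElem?]; exact hget
    have hlast : p.getLast hp = c := by
      rw [List.getLast?_eq_some_getLast hp] at hg
      exact Option.some.inj hg
    refine ⟨p.dropLast, ?_⟩
    have hsplit : p.dropLast ++ [c] = p := by
      conv_rhs => rw [← List.dropLast_append_getLast hp]
      rw [hlast]
    calc p.dropLast ++ c :: w = (p.dropLast ++ [c]) ++ w := by simp
      _ = p ++ w := by rw [hsplit]

-- a nonempty suffix fixes the last element
theorem pv_suffix_getLast? (s l : List Char) (hs : s ≠ []) (h : s <:+ l) :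
    l.getLast? = s.getLast? := by
  obtain ⟨p, rfl⟩ := h
  rw [List.getLast?_append]
  cases hg : s.getLast? with
  | none => exact absurd (List.getLast?_eq_none_iff.mp hg) hs
  | some x => rfl

theorem pv_excl (l : List Char)
    (h1 : PySem.Chars.endswith l ("long".toList) = true)
    (h2 : PySem.Chars.endswith l ("short".toList) = true) : False := by
  rw [PySem.Chars.endswith_iff] at h1 h2
  have e1 := pv_suffix_getLast? _ _ (by decide) h1
  have e2 := pv_suffix_getLast? _ _ (by decide) h2
  rw [e1] at e2
  simp at e2

-- A's test "lowered ends with sep::w" in terms of the original text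
theorem pv_testA (t : List Char) (sep : Char) (hsep : sep.toNat < 65 ∨ (90 < sep.toNat ∧ sep.toNat < 97)) (w : List Char) :
    PySem.Chars.endswith (PySem.Chars.lower t) (sep :: w) = true ↔
      (PySem.Chars.endswith (PySem.Chars.lower t) w = true ∧ w.length < t.length ∧
        t[t.length - w.length - 1]? = some sep) := by
  rw [pv_endswith_cons_iff]
  unfold PySem.Chars.lower
  simp only [List.length_map, List.getElem?_map]
  constructor
  · rintro ⟨h1, h2, h3⟩
    refine ⟨h1, h2, ?_⟩
    cases hg : t[t.length - w.length - 1]? with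
    | none => rw [hg] at h3; simp at h3
    | some d =>
      rw [hg] at h3
      simp only [Option.map_some, Option.some.injEq] at h3
      have hd : d = sep := (pv_lowerChar_eq_iff d sep hsep).mp h3
      rw [hd]
  · rintro ⟨h1, h2, h3⟩
    refine ⟨h1, h2, ?_⟩
    rw [h3]
    simp only [Option.map_some, Option.some.injEq]
    exact (pv_lowerChar_eq_iff sep sep hsep).mpr rfl

-- A's per-suffix test, at the String level, in terms of the original text
theorem pv_strTest (text : String) (sep : Char) (hsep : sep.toNat < 65 ∨ (90 < sep.toNat ∧ sep.toNat < 97)) (w suf : String)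
    (hsuf : suf.toList = sep :: w.toList) :
    PySem.Str.endswith (PySem.Str.lower text) suf = true ↔
      (PySem.Str.endswith (PySem.Str.lower text) w = true ∧
        w.toList.length < text.toList.length ∧
        text.toList[text.toList.length - w.toList.length - 1]? = some sep) := by
  simp only [PySem.Str.endswith_eq, PySem.Str.toList_lower, hsuf]
  exact pv_testA text.toList sep hsep w.toList

theorem pv_false_of_word (text : String) (sep : Char) (hsep : sep.toNat < 65 ∨ (90 < sep.toNat ∧ sep.toNat < 97)) (w suf : String)
    (hsuf : suf.toList = sep :: w.toList)
    (hw : PySem.Str.endswith (PySem.Str.lower text) w = false) :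
    PySem.Str.endswith (PySem.Str.lower text) suf = false := by
  rw [Bool.eq_false_iff]
  intro hx
  have := ((pv_strTest text sep hsep w suf hsuf).mp hx).1
  rw [hw] at this; exact Bool.false_ne_true this

theorem pv_false_of_len (text : String) (sep : Char) (hsep : sep.toNat < 65 ∨ (90 < sep.toNat ∧ sep.toNat < 97)) (w suf : String)
    (hsuf : suf.toList = sep :: w.toList)
    (hlen : text.toList.length ≤ w.toList.length) :
    PySem.Str.endswith (PySem.Str.lower text) suf = false := by
  rw [Bool.eq_false_iff]
  intro hx
  have := ((pv_strTest text sep hsep w suf hsuf).mp hx).2.1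
  omega

theorem pv_false_of_char (text : String) (sep : Char) (hsep : sep.toNat < 65 ∨ (90 < sep.toNat ∧ sep.toNat < 97)) (w suf : String)
    (hsuf : suf.toList = sep :: w.toList) (d : Char)
    (hd : text.toList[text.toList.length - w.toList.length - 1]? = some d)
    (hne : d ≠ sep) :
    PySem.Str.endswith (PySem.Str.lower text) suf = false := by
  rw [Bool.eq_false_iff]
  intro hx
  have := ((pv_strTest text sep hsep w suf hsuf).mp hx).2.2
  rw [hd] at this
  exact hne (Option.some.inj this)

theorem pv_excl_str (text : String)
    (h1 : PySem.Str.endswith (PySem.Str.lower text) "long" = true)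
    (h2 : PySem.Str.endswith (PySem.Str.lower text) "short" = true) : False := by
  simp only [PySem.Str.endswith_eq, PySem.Str.toList_lower] at h1 h2
  exact pv_excl _ h1 h2

theorem pv_pyGet_neg (text : String) (k : Nat) (hk : 0 < k) (hlen : k ≤ text.toList.length) :
    PySem.Str.pyGet? text (-(k : Int)) = text.toList[text.toList.length - k]? := by
  simp only [PySem.Str.pyGet?, PySem.Chars.pyGet?_eq_listPyGet?, PySem.List.pyGet?,
    PySem.List.pyIdx?]
  rw [if_neg (by omega), if_pos (by omega)]
  simp

theorem pvLoopA_nil (text lowered : String) : pvLoopA text lowered [] = "" := rfl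

theorem pvLoopA_cons_false (text lowered suf : String) (rest : List String)
    (hf : PySem.Str.endswith lowered suf = false) :
    pvLoopA text lowered (suf :: rest) = pvLoopA text lowered rest := by
  simp only [pvLoopA]
  rw [hf]
  simp

theorem pvLoopA_cons_true (text lowered suf : String) (rest : List String)
    (ht : PySem.Str.endswith lowered suf = true) :
    pvLoopA text lowered (suf :: rest) =
      (if pvSepRstrip (PySem.Str.slice text none (some (-(PySem.Str.len suf)))) ≠ "" then
        pvSepRstrip (PySem.Str.slice text none (some (-(PySem.Str.len suf))))
      else pvLoopA text lowered rest) := by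
  simp only [pvLoopA]
  rw [ht]
  simp

theorem pvBoundary_short (text : String) (wl : Nat)
    (hlen : PySem.Str.len text ≤ (wl : Int)) : pvBoundary text wl = "" := by
  unfold pvBoundary
  rw [if_pos hlen]

theorem pvBoundary_eq (text : String) (wl : Nat) (c : Char)
    (hlen : ¬ PySem.Str.len text ≤ (wl : Int))
    (hc : PySem.Str.pyGet? text (-(wl : Int) - 1) = some c) :
    pvBoundary text wl =
      (if (c == '-' || c == '_' || c == '/') = true then
        (if pvSepRstrip (PySem.Str.slice text none (some (-(wl : Int) - 1))) ≠ "" then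
          pvSepRstrip (PySem.Str.slice text none (some (-(wl : Int) - 1)))
        else "")
      else "") := by
  unfold pvBoundary
  rw [if_neg hlen, hc]

theorem pv_core (text : String) :
    pvLoopA text (PySem.Str.lower text)
      ["-long", "-short", "_long", "_short", "/long", "/short"] =
    (if PySem.Str.endswith (PySem.Str.lower text) "long" = true then pvBoundary text 4
     else if PySem.Str.endswith (PySem.Str.lower text) "short" = true then pvBoundary text 5
     else "") := by
  have hTlong : ("-long" : String).toList = '-' :: ("long" : String).toList := by decide
  have hTshort : ("-short" : String).toList = '-' :: ("short" : String).toList := by decide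
  have hUlong : ("_long" : String).toList = '_' :: ("long" : String).toList := by decide
  have hUshort : ("_short" : String).toList = '_' :: ("short" : String).toList := by decide
  have hSlong : ("/long" : String).toList = '/' :: ("long" : String).toList := by decide
  have hSshort : ("/short" : String).toList = '/' :: ("short" : String).toList := by decide
  have hsep1 : ('-' : Char).toNat < 65 ∨ (90 < ('-' : Char).toNat ∧ ('-' : Char).toNat < 97) := by decide
  have hsep2 : ('_' : Char).toNat < 65 ∨ (90 < ('_' : Char).toNat ∧ ('_' : Char).toNat < 97) := by decide
  have hsep3 : ('/' : Char).toNat < 65 ∨ (90 < ('/' : Char).toNat ∧ ('/' : Char).toNat < 97) := by decide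
  have hlenTlong : -(PySem.Str.len "-long") = (-((4 : Nat) : Int) - 1) := by decide
  have hlenUlong : -(PySem.Str.len "_long") = (-((4 : Nat) : Int) - 1) := by decide
  have hlenSlong : -(PySem.Str.len "/long") = (-((4 : Nat) : Int) - 1) := by decide
  have hlenTshort : -(PySem.Str.len "-short") = (-((5 : Nat) : Int) - 1) := by decide
  have hlenUshort : -(PySem.Str.len "_short") = (-((5 : Nat) : Int) - 1) := by decide
  have hlenSshort : -(PySem.Str.len "/short") = (-((5 : Nat) : Int) - 1) := by decide
  by_cases hL : PySem.Str.endswith (PySem.Str.lower text) "long" = true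
  · have hS : PySem.Str.endswith (PySem.Str.lower text) "short" = false := by
      rw [Bool.eq_false_iff]; intro hx; exact pv_excl_str text hL hx
    have f2 := pv_false_of_word text '-' hsep1 "short" "-short" hTshort hS
    have f4 := pv_false_of_word text '_' hsep2 "short" "_short" hUshort hS
    have f6 := pv_false_of_word text '/' hsep3 "short" "/short" hSshort hS
    rw [if_pos hL]
    by_cases hlen : text.toList.length ≤ 4
    · have f1 := pv_false_of_len text '-' hsep1 "long" "-long" hTlong (by simpa using hlen)
      have f3 := pv_false_of_len text '_' hsep2 "long" "_long" hUlong (by simpa using hlen)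
      have f5 := pv_false_of_len text '/' hsep3 "long" "/long" hSlong (by simpa using hlen)
      have hblen : PySem.Str.len text ≤ ((4 : Nat) : Int) := by
        simp only [PySem.Str.len]; exact_mod_cast hlen
      rw [pvLoopA_cons_false _ _ _ _ f1, pvLoopA_cons_false _ _ _ _ f2,
        pvLoopA_cons_false _ _ _ _ f3, pvLoopA_cons_false _ _ _ _ f4,
        pvLoopA_cons_false _ _ _ _ f5, pvLoopA_cons_false _ _ _ _ f6,
        pvLoopA_nil, pvBoundary_short text 4 hblen]
    · rw [Nat.not_le] at hlen
      obtain ⟨d, hd⟩ : ∃ d, text.toList[text.toList.length - 5]? = some d := by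
        have : text.toList.length - 5 < text.toList.length := by omega
        exact ⟨_, List.getElem?_eq_getElem this⟩
      have hd4 : text.toList[text.toList.length - ("long" : String).toList.length - 1]? = some d := by
        have he : text.toList.length - ("long" : String).toList.length - 1
            = text.toList.length - 5 := by
          have h4 : ("long" : String).toList.length = 4 := by decide
          omega
        rw [he]; exact hd
      have hpg : PySem.Str.pyGet? text (-((4 : Nat) : Int) - 1) = some d := by
        have he : (-((4 : Nat) : Int) - 1) = -((5 : Nat) : Int) := by norm_num
        rw [he, pv_pyGet_neg text 5 (by omega) (by omega)]
        exact hd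
      have hblen : ¬ PySem.Str.len text ≤ ((4 : Nat) : Int) := by
        simp only [PySem.Str.len]; push_cast; omega
      have hwlen : ("long" : String).toList.length < text.toList.length := by
        have h4 : ("long" : String).toList.length = 4 := by decide
        omega
      rw [pvBoundary_eq text 4 d hblen hpg]
      by_cases hd1 : d = '-'
      · subst hd1
        have t1 := (pv_strTest text '-' hsep1 "long" "-long" hTlong).mpr ⟨hL, hwlen, hd4⟩
        have f3 := pv_false_of_char text '_' hsep2 "long" "_long" hUlong '-' hd4 (by decide)
        have f5 := pv_false_of_char text '/' hsep3 "long" "/long" hSlong '-' hd4 (by decide)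
        rw [pvLoopA_cons_true _ _ _ _ t1, hlenTlong, if_pos (show ('-' == '-' || '-' == '_' || '-' == '/') = true from by decide)]
        split_ifs with hbase
        · rfl
        · rw [pvLoopA_cons_false _ _ _ _ f2, pvLoopA_cons_false _ _ _ _ f3,
            pvLoopA_cons_false _ _ _ _ f4, pvLoopA_cons_false _ _ _ _ f5,
            pvLoopA_cons_false _ _ _ _ f6, pvLoopA_nil]
      · by_cases hd2 : d = '_'
        · subst hd2
          have t3 := (pv_strTest text '_' hsep2 "long" "_long" hUlong).mpr ⟨hL, hwlen, hd4⟩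
          have f1 := pv_false_of_char text '-' hsep1 "long" "-long" hTlong '_' hd4 (by decide)
          have f5 := pv_false_of_char text '/' hsep3 "long" "/long" hSlong '_' hd4 (by decide)
          rw [pvLoopA_cons_false _ _ _ _ f1, pvLoopA_cons_false _ _ _ _ f2,
            pvLoopA_cons_true _ _ _ _ t3, hlenUlong, if_pos (show ('_' == '-' || '_' == '_' || '_' == '/') = true from by decide)]
          split_ifs with hbase
          · rfl
          · rw [pvLoopA_cons_false _ _ _ _ f4, pvLoopA_cons_false _ _ _ _ f5,
              pvLoopA_cons_false _ _ _ _ f6, pvLoopA_nil]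
        · by_cases hd3 : d = '/'
          · subst hd3
            have t5 := (pv_strTest text '/' hsep3 "long" "/long" hSlong).mpr ⟨hL, hwlen, hd4⟩
            have f1 := pv_false_of_char text '-' hsep1 "long" "-long" hTlong '/' hd4 (by decide)
            have f3 := pv_false_of_char text '_' hsep2 "long" "_long" hUlong '/' hd4 (by decide)
            rw [pvLoopA_cons_false _ _ _ _ f1, pvLoopA_cons_false _ _ _ _ f2,
              pvLoopA_cons_false _ _ _ _ f3, pvLoopA_cons_false _ _ _ _ f4,
              pvLoopA_cons_true _ _ _ _ t5, hlenSlong, if_pos (show ('/' == '-' || '/' == '_' || '/' == '/') = true from by decide)]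
            split_ifs with hbase
            · rfl
            · rw [pvLoopA_cons_false _ _ _ _ f6, pvLoopA_nil]
          · have f1 := pv_false_of_char text '-' hsep1 "long" "-long" hTlong d hd4 hd1
            have f3 := pv_false_of_char text '_' hsep2 "long" "_long" hUlong d hd4 hd2
            have f5 := pv_false_of_char text '/' hsep3 "long" "/long" hSlong d hd4 hd3
            rw [pvLoopA_cons_false _ _ _ _ f1, pvLoopA_cons_false _ _ _ _ f2,
              pvLoopA_cons_false _ _ _ _ f3, pvLoopA_cons_false _ _ _ _ f4,
              pvLoopA_cons_false _ _ _ _ f5, pvLoopA_cons_false _ _ _ _ f6,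
              pvLoopA_nil, if_neg (by simp [hd1, hd2, hd3])]
  · have hLf : PySem.Str.endswith (PySem.Str.lower text) "long" = false :=
      Bool.eq_false_iff.mpr hL
    have f1 := pv_false_of_word text '-' hsep1 "long" "-long" hTlong hLf
    have f3 := pv_false_of_word text '_' hsep2 "long" "_long" hUlong hLf
    have f5 := pv_false_of_word text '/' hsep3 "long" "/long" hSlong hLf
    rw [if_neg hL]
    by_cases hSe : PySem.Str.endswith (PySem.Str.lower text) "short" = true
    · rw [if_pos hSe]
      by_cases hlen : text.toList.length ≤ 5
      · have f2 := pv_false_of_len text '-' hsep1 "short" "-short" hTshort (by simpa using hlen)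
        have f4 := pv_false_of_len text '_' hsep2 "short" "_short" hUshort (by simpa using hlen)
        have f6 := pv_false_of_len text '/' hsep3 "short" "/short" hSshort (by simpa using hlen)
        have hblen : PySem.Str.len text ≤ ((5 : Nat) : Int) := by
          simp only [PySem.Str.len]; exact_mod_cast hlen
        rw [pvLoopA_cons_false _ _ _ _ f1, pvLoopA_cons_false _ _ _ _ f2,
          pvLoopA_cons_false _ _ _ _ f3, pvLoopA_cons_false _ _ _ _ f4,
          pvLoopA_cons_false _ _ _ _ f5, pvLoopA_cons_false _ _ _ _ f6,
          pvLoopA_nil, pvBoundary_short text 5 hblen]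
      · rw [Nat.not_le] at hlen
        obtain ⟨d, hd⟩ : ∃ d, text.toList[text.toList.length - 6]? = some d := by
          have : text.toList.length - 6 < text.toList.length := by omega
          exact ⟨_, List.getElem?_eq_getElem this⟩
        have hd5 : text.toList[text.toList.length - ("short" : String).toList.length - 1]? = some d := by
          have he : text.toList.length - ("short" : String).toList.length - 1
              = text.toList.length - 6 := by
            have h5 : ("short" : String).toList.length = 5 := by decide
            omega
          rw [he]; exact hd
        have hpg : PySem.Str.pyGet? text (-((5 : Nat) : Int) - 1) = some d := by
          have he : (-((5 : Nat) : Int) - 1) = -((6 : Nat) : Int) := by norm_num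
          rw [he, pv_pyGet_neg text 6 (by omega) (by omega)]
          exact hd
        have hblen : ¬ PySem.Str.len text ≤ ((5 : Nat) : Int) := by
          simp only [PySem.Str.len]; push_cast; omega
        have hwlen : ("short" : String).toList.length < text.toList.length := by
          have h5 : ("short" : String).toList.length = 5 := by decide
          omega
        rw [pvBoundary_eq text 5 d hblen hpg]
        by_cases hd1 : d = '-'
        · subst hd1
          have t2 := (pv_strTest text '-' hsep1 "short" "-short" hTshort).mpr ⟨hSe, hwlen, hd5⟩
          have f4 := pv_false_of_char text '_' hsep2 "short" "_short" hUshort '-' hd5 (by decide)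
          have f6 := pv_false_of_char text '/' hsep3 "short" "/short" hSshort '-' hd5 (by decide)
          rw [pvLoopA_cons_false _ _ _ _ f1, pvLoopA_cons_true _ _ _ _ t2, hlenTshort,
            if_pos (show ('-' == '-' || '-' == '_' || '-' == '/') = true from by decide)]
          split_ifs with hbase
          · rfl
          · rw [pvLoopA_cons_false _ _ _ _ f3, pvLoopA_cons_false _ _ _ _ f4,
              pvLoopA_cons_false _ _ _ _ f5, pvLoopA_cons_false _ _ _ _ f6, pvLoopA_nil]
        · by_cases hd2 : d = '_'
          · subst hd2
            have t4 := (pv_strTest text '_' hsep2 "short" "_short" hUshort).mpr ⟨hSe, hwlen, hd5⟩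
            have f2 := pv_false_of_char text '-' hsep1 "short" "-short" hTshort '_' hd5 (by decide)
            have f6 := pv_false_of_char text '/' hsep3 "short" "/short" hSshort '_' hd5 (by decide)
            rw [pvLoopA_cons_false _ _ _ _ f1, pvLoopA_cons_false _ _ _ _ f2,
              pvLoopA_cons_false _ _ _ _ f3, pvLoopA_cons_true _ _ _ _ t4, hlenUshort,
              if_pos (show ('_' == '-' || '_' == '_' || '_' == '/') = true from by decide)]
            split_ifs with hbase
            · rfl
            · rw [pvLoopA_cons_false _ _ _ _ f5, pvLoopA_cons_false _ _ _ _ f6, pvLoopA_nil]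
          · by_cases hd3 : d = '/'
            · subst hd3
              have t6 := (pv_strTest text '/' hsep3 "short" "/short" hSshort).mpr ⟨hSe, hwlen, hd5⟩
              have f2 := pv_false_of_char text '-' hsep1 "short" "-short" hTshort '/' hd5 (by decide)
              have f4 := pv_false_of_char text '_' hsep2 "short" "_short" hUshort '/' hd5 (by decide)
              rw [pvLoopA_cons_false _ _ _ _ f1, pvLoopA_cons_false _ _ _ _ f2,
                pvLoopA_cons_false _ _ _ _ f3, pvLoopA_cons_false _ _ _ _ f4,
                pvLoopA_cons_false _ _ _ _ f5, pvLoopA_cons_true _ _ _ _ t6, hlenSshort,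
                if_pos (show ('/' == '-' || '/' == '_' || '/' == '/') = true from by decide)]
              split_ifs with hbase
              · rfl
              · rw [pvLoopA_nil]
            · have f2 := pv_false_of_char text '-' hsep1 "short" "-short" hTshort d hd5 hd1
              have f4 := pv_false_of_char text '_' hsep2 "short" "_short" hUshort d hd5 hd2
              have f6 := pv_false_of_char text '/' hsep3 "short" "/short" hSshort d hd5 hd3
              rw [pvLoopA_cons_false _ _ _ _ f1, pvLoopA_cons_false _ _ _ _ f2,
                pvLoopA_cons_false _ _ _ _ f3, pvLoopA_cons_false _ _ _ _ f4,
                pvLoopA_cons_false _ _ _ _ f5, pvLoopA_cons_false _ _ _ _ f6,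
                pvLoopA_nil, if_neg (by simp [hd1, hd2, hd3])]
    · have hSf : PySem.Str.endswith (PySem.Str.lower text) "short" = false :=
        Bool.eq_false_iff.mpr hSe
      have f2 := pv_false_of_word text '-' hsep1 "short" "-short" hTshort hSf
      have f4 := pv_false_of_word text '_' hsep2 "short" "_short" hUshort hSf
      have f6 := pv_false_of_word text '/' hsep3 "short" "/short" hSshort hSf
      rw [if_neg hSe, pvLoopA_cons_false _ _ _ _ f1, pvLoopA_cons_false _ _ _ _ f2,
        pvLoopA_cons_false _ _ _ _ f3, pvLoopA_cons_false _ _ _ _ f4,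
        pvLoopA_cons_false _ _ _ _ f5, pvLoopA_cons_false _ _ _ _ f6, pvLoopA_nil]

-- ===== VERDICT (by name: the statement is the Claim_ definition above) =====
theorem base_strategy_tag_py_spec : Claim_equal_base_strategy_tag_py := by
  intro value _
  unfold Spec_base_strategy_tag_py base_strategy_tag_py base_strategy_tag_py_alt
  by_cases h : PySem.Str.strip (value.getD "") = ""
  · simp [h]
  · simp only [h, if_false]
    exact pv_core _
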